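-- pv_equiv track=rewrite | github.com/mostafaamer1234/mini-data-platform | agent/platform/adapter.py | _table_score
-- ===== SOURCE A (Python) =====
-- def _table_score(columns: list[str]) -> int:
--     lower = {c.lower() for c in columns}
--     score = 0
--     if {"total", "revenue", "amount"} & lower:
--         score += 4
--     if {"transaction_date", "order_date", "created_at", "event_time", "date"} & lower:
--         score += 3
--     if {"transaction_id", "order_id"} & lower:
--         score += 3
--     if {"user_id", "customer_id"} & lower:
--         score += 2
--     if {"product_id", "product_name"} & lower:
--         score += 1
--     return score
-- ===== SOURCE B (Python) =====
-- _BIT = {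
--     "total": 1, "revenue": 1, "amount": 1,
--     "transaction_date": 2, "order_date": 2, "created_at": 2, "event_time": 2, "date": 2,
--     "transaction_id": 4, "order_id": 4,
--     "user_id": 8, "customer_id": 8,
--     "product_id": 16, "product_name": 16,
-- }
--
-- # _SCORE[m] = weighted popcount of the 5-bit group mask m (weights 4,3,3,2,1 for bits 0..4)
-- _SCORE = (0, 4, 3, 7, 3, 7, 6, 10, 2, 6, 5, 9, 5, 9, 8, 12,
--           1, 5, 4, 8, 4, 8, 7, 11, 3, 7, 6, 10, 6, 10, 9, 13)
--
--
-- def _table_score(columns: list[str]) -> int: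
--     mask = 0
--     for c in columns:
--         mask |= _BIT.get(c.lower(), 0)
--         if mask == 31:
--             break
--     return _SCORE[mask]
-- ===== Notes on version B (the rewrite author's own statement) =====
-- stated objective: alternative
-- what changed: Replaces A's five fixed-set intersections against a built set of lowered names by a single early-exiting pass over the columns that ORs per-keyword bit flags into an integer mask, finished by one lookup in a precomputed 32-entry weighted-popcount table.
import Mathlib
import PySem

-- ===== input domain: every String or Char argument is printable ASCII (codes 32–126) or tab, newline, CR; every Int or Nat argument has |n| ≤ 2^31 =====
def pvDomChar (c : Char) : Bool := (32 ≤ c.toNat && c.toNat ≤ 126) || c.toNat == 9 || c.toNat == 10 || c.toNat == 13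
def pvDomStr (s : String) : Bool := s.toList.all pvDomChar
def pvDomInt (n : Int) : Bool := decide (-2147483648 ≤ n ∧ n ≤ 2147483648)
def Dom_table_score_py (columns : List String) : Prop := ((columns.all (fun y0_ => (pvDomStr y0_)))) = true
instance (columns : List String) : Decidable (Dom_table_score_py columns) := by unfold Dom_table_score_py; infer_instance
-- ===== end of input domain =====

-- B replaces A's five set intersections against a set of lowered names by a single early-exiting
-- pass over the columns folding per-keyword bit flags into an integer mask, finished by one lookup
-- in a precomputed 32-entry weighted-popcount table (alternative algorithm, same cost).

-- ===== PORT A =====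
def table_score_py (columns : List String) : Int :=
  let lower : PySem.Set String := PySem.Set.ofList (columns.map PySem.Str.lower)
  let score : Int := 0
  let score := if !(PySem.Set.inter (PySem.Set.ofList ["total", "revenue", "amount"]) lower).isEmpty then score + 4 else score
  let score := if !(PySem.Set.inter (PySem.Set.ofList ["transaction_date", "order_date", "created_at", "event_time", "date"]) lower).isEmpty then score + 3 else score
  let score := if !(PySem.Set.inter (PySem.Set.ofList ["transaction_id", "order_id"]) lower).isEmpty then score + 3 else score
  let score := if !(PySem.Set.inter (PySem.Set.ofList ["user_id", "customer_id"]) lower).isEmpty then score + 2 else score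
  let score := if !(PySem.Set.inter (PySem.Set.ofList ["product_id", "product_name"]) lower).isEmpty then score + 1 else score
  score

-- ===== PORT B =====
def kwBit : PySem.Dict String Int := PySem.Dict.mk
  [("total", 1), ("revenue", 1), ("amount", 1),
   ("transaction_date", 2), ("order_date", 2), ("created_at", 2), ("event_time", 2), ("date", 2),
   ("transaction_id", 4), ("order_id", 4),
   ("user_id", 8), ("customer_id", 8),
   ("product_id", 16), ("product_name", 16)]

-- _SCORE[m] = weighted popcount of the 5-bit mask m
def scoreTab : List Int :=
  [0, 4, 3, 7, 3, 7, 6, 10, 2, 6, 5, 9, 5, 9, 8, 12,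
   1, 5, 4, 8, 4, 8, 7, 11, 3, 7, 6, 10, 6, 10, 9, 13]

def bLoop : List String → Int → Int
  | [], mask => mask
  | c :: cs, mask =>
      let mask := PySem.Int.bor mask ((PySem.Dict.get? kwBit (PySem.Str.lower c)).getD 0)
      if mask == 31 then mask else bLoop cs mask

def table_score_py_alt (columns : List String) : Int :=
  -- the mask is provably in 0..31, so _SCORE[mask] never raises; .getD 0 is unreachable
  (PySem.List.pyGet? scoreTab (bLoop columns 0)).getD 0

-- ===== PRECONDITION & SPEC =====
def Spec_table_score_py (columns : List String) (out : Int) : Prop := out = table_score_py_alt columns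
instance (columns : List String) (out : Int) : Decidable (Spec_table_score_py columns out) := by unfold Spec_table_score_py; infer_instance

-- ===== CLAIM (what is proved, stated in full; the proofs are below) =====
def Claim_equal_table_score_py : Prop := ∀ (columns : List String), Dom_table_score_py columns → Spec_table_score_py columns (table_score_py columns)

-- ===== LEMMAS AND PROOFS =====

-- A's intersection test for a keyword list ks is "some column's lowering lies in ks"
lemma inter_nonempty (ks : List String) (columns : List String) :
    (!(PySem.Set.inter (PySem.Set.ofList ks) (PySem.Set.ofList (columns.map PySem.Str.lower))).isEmpty)
      = columns.any (fun c => ks.contains (PySem.Str.lower c)) := by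
  rw [Bool.eq_iff_iff, Bool.not_eq_true', List.isEmpty_eq_false_iff_exists_mem, List.any_eq_true]
  simp only [PySem.Set.mem_inter, PySem.Set.mem_ofList, List.mem_map, List.contains_iff_mem]
  constructor
  · rintro ⟨x, hk, c, hc, rfl⟩
    exact ⟨c, hc, hk⟩
  · rintro ⟨c, hc, hk⟩
    exact ⟨PySem.Str.lower c, hk, c, hc, rfl⟩

-- group presence booleans (A's five tests, as scans of the columns)
def a0 (cols : List String) : Bool := cols.any (fun c => (["total", "revenue", "amount"] : List String).contains (PySem.Str.lower c))
def a1 (cols : List String) : Bool := cols.any (fun c => (["transaction_date", "order_date", "created_at", "event_time", "date"] : List String).contains (PySem.Str.lower c))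
def a2 (cols : List String) : Bool := cols.any (fun c => (["transaction_id", "order_id"] : List String).contains (PySem.Str.lower c))
def a3 (cols : List String) : Bool := cols.any (fun c => (["user_id", "customer_id"] : List String).contains (PySem.Str.lower c))
def a4 (cols : List String) : Bool := cols.any (fun c => (["product_id", "product_name"] : List String).contains (PySem.Str.lower c))

-- "bit w of mask is set" (w a power of two)
def hb (mask w : Int) : Bool := PySem.Int.band mask w == w

-- the generalized invariant value: weights of groups already flagged in mask or present in cols
def F (mask : Int) (cols : List String) : Int :=
  (if hb mask 1 || a0 cols then 4 else 0) + (if hb mask 2 || a1 cols then 3 else 0)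
    + (if hb mask 4 || a2 cols then 3 else 0) + (if hb mask 8 || a3 cols then 2 else 0)
    + (if hb mask 16 || a4 cols then 1 else 0)

def scoreGet (m : Int) : Int := (PySem.List.pyGet? scoreTab m).getD 0

lemma kwBit_keys_nodup : (PySem.Dict.keys kwBit).Nodup := by decide

lemma bitc_mem (x : String) :
    ((PySem.Dict.get? kwBit x).getD 0 : Int) = 0 ∨ ((PySem.Dict.get? kwBit x).getD 0 : Int) = 1
      ∨ ((PySem.Dict.get? kwBit x).getD 0 : Int) = 2 ∨ ((PySem.Dict.get? kwBit x).getD 0 : Int) = 4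
      ∨ ((PySem.Dict.get? kwBit x).getD 0 : Int) = 8 ∨ ((PySem.Dict.get? kwBit x).getD 0 : Int) = 16 := by
  cases h : PySem.Dict.get? kwBit x with
  | none => simp
  | some v =>
    have hm := (PySem.Dict.get?_eq_some_iff_mem_items kwBit x v kwBit_keys_nodup).mp h
    simp only [kwBit, List.mem_cons, List.not_mem_nil, or_false, Prod.mk.injEq] at hm
    simp only [Option.getD_some]
    rcases hm with ⟨_, rfl⟩|⟨_, rfl⟩|⟨_, rfl⟩|⟨_, rfl⟩|⟨_, rfl⟩|⟨_, rfl⟩|⟨_, rfl⟩|⟨_, rfl⟩|⟨_, rfl⟩|⟨_, rfl⟩|⟨_, rfl⟩|⟨_, rfl⟩|⟨_, rfl⟩|⟨_, rfl⟩ <;> simp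

lemma getD_beq (x : String) (w : Int) (hw : ¬ w = 0) :
    (((PySem.Dict.get? kwBit x).getD 0 : Int) == w) = (PySem.Dict.get? kwBit x == some w) := by
  cases h : PySem.Dict.get? kwBit x with
  | none => simp; omega
  | some v => simp

lemma beq_one (x : String) : (((PySem.Dict.get? kwBit x).getD 0 : Int) == 1) = (["total", "revenue", "amount"] : List String).contains x := by
  rw [getD_beq x 1 (by norm_num), Bool.eq_iff_iff, beq_iff_eq,
    PySem.Dict.get?_eq_some_iff_mem_items kwBit x 1 kwBit_keys_nodup, List.contains_iff_mem]
  simp [kwBit, Prod.ext_iff]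
lemma beq_two (x : String) : (((PySem.Dict.get? kwBit x).getD 0 : Int) == 2) = (["transaction_date", "order_date", "created_at", "event_time", "date"] : List String).contains x := by
  rw [getD_beq x 2 (by norm_num), Bool.eq_iff_iff, beq_iff_eq,
    PySem.Dict.get?_eq_some_iff_mem_items kwBit x 2 kwBit_keys_nodup, List.contains_iff_mem]
  simp [kwBit, Prod.ext_iff]
lemma beq_four (x : String) : (((PySem.Dict.get? kwBit x).getD 0 : Int) == 4) = (["transaction_id", "order_id"] : List String).contains x := by
  rw [getD_beq x 4 (by norm_num), Bool.eq_iff_iff, beq_iff_eq,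
    PySem.Dict.get?_eq_some_iff_mem_items kwBit x 4 kwBit_keys_nodup, List.contains_iff_mem]
  simp [kwBit, Prod.ext_iff]
lemma beq_eight (x : String) : (((PySem.Dict.get? kwBit x).getD 0 : Int) == 8) = (["user_id", "customer_id"] : List String).contains x := by
  rw [getD_beq x 8 (by norm_num), Bool.eq_iff_iff, beq_iff_eq,
    PySem.Dict.get?_eq_some_iff_mem_items kwBit x 8 kwBit_keys_nodup, List.contains_iff_mem]
  simp [kwBit, Prod.ext_iff]
lemma beq_sixteen (x : String) : (((PySem.Dict.get? kwBit x).getD 0 : Int) == 16) = (["product_id", "product_name"] : List String).contains x := by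
  rw [getD_beq x 16 (by norm_num), Bool.eq_iff_iff, beq_iff_eq,
    PySem.Dict.get?_eq_some_iff_mem_items kwBit x 16 kwBit_keys_nodup, List.contains_iff_mem]
  simp [kwBit, Prod.ext_iff]

lemma bor_range (mask b : Int) (h0 : 0 ≤ mask) (h1 : mask < 32)
    (hb6 : b = 0 ∨ b = 1 ∨ b = 2 ∨ b = 4 ∨ b = 8 ∨ b = 16) :
    0 ≤ PySem.Int.bor mask b ∧ PySem.Int.bor mask b < 32 := by
  interval_cases mask <;> rcases hb6 with rfl | rfl | rfl | rfl | rfl | rfl <;> decide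

lemma hb_bor (mask b w : Int) (h0 : 0 ≤ mask) (h1 : mask < 32)
    (hb6 : b = 0 ∨ b = 1 ∨ b = 2 ∨ b = 4 ∨ b = 8 ∨ b = 16)
    (hw : w = 1 ∨ w = 2 ∨ w = 4 ∨ w = 8 ∨ w = 16) :
    hb (PySem.Int.bor mask b) w = (hb mask w || (b == w)) := by
  interval_cases mask <;> rcases hb6 with rfl | rfl | rfl | rfl | rfl | rfl <;>
    rcases hw with rfl | rfl | rfl | rfl | rfl <;> decide

lemma base_case (mask : Int) (h0 : 0 ≤ mask) (h1 : mask < 32) :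
    scoreGet mask = F mask [] := by
  interval_cases mask <;> decide

lemma main_inv (cols : List String) (mask : Int) (h0 : 0 ≤ mask) (h1 : mask < 32) :
    scoreGet (bLoop cols mask) = F mask cols := by
  induction cols generalizing mask with
  | nil => exact base_case mask h0 h1
  | cons c cs ih =>
    have hb6 := bitc_mem (PySem.Str.lower c)
    have hF : F mask (c :: cs)
        = F (PySem.Int.bor mask ((PySem.Dict.get? kwBit (PySem.Str.lower c)).getD 0)) cs := by
      simp only [F, a0, a1, a2, a3, a4, List.any_cons,
        hb_bor mask ((PySem.Dict.get? kwBit (PySem.Str.lower c)).getD 0) 1 h0 h1 hb6 (by norm_num),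
        hb_bor mask ((PySem.Dict.get? kwBit (PySem.Str.lower c)).getD 0) 2 h0 h1 hb6 (by norm_num),
        hb_bor mask ((PySem.Dict.get? kwBit (PySem.Str.lower c)).getD 0) 4 h0 h1 hb6 (by norm_num),
        hb_bor mask ((PySem.Dict.get? kwBit (PySem.Str.lower c)).getD 0) 8 h0 h1 hb6 (by norm_num),
        hb_bor mask ((PySem.Dict.get? kwBit (PySem.Str.lower c)).getD 0) 16 h0 h1 hb6 (by norm_num),
        beq_one, beq_two, beq_four, beq_eight, beq_sixteen, Bool.or_assoc]
      rfl
    obtain ⟨hr0, hr1⟩ := bor_range mask ((PySem.Dict.get? kwBit (PySem.Str.lower c)).getD 0) h0 h1 hb6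
    rw [hF]
    show scoreGet (if PySem.Int.bor mask ((PySem.Dict.get? kwBit (PySem.Str.lower c)).getD 0) == 31
        then PySem.Int.bor mask ((PySem.Dict.get? kwBit (PySem.Str.lower c)).getD 0)
        else bLoop cs (PySem.Int.bor mask ((PySem.Dict.get? kwBit (PySem.Str.lower c)).getD 0))) = _
    by_cases h31 : PySem.Int.bor mask ((PySem.Dict.get? kwBit (PySem.Str.lower c)).getD 0) = 31
    · rw [h31]
      simp only [BEq.rfl, if_true]
      have hall : ∀ w : Int, w = 1 ∨ w = 2 ∨ w = 4 ∨ w = 8 ∨ w = 16 → hb (31 : Int) w = true := by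
        intro w hw; rcases hw with rfl | rfl | rfl | rfl | rfl <;> decide
      simp [F, hall 1 (by norm_num), hall 2 (by norm_num), hall 4 (by norm_num),
        hall 8 (by norm_num), hall 16 (by norm_num), scoreGet]
      rfl
    · rw [if_neg (by simpa using h31)]
      exact ih _ hr0 hr1

lemma alt_eq (cols : List String) : table_score_py_alt cols = F 0 cols := by
  rw [show table_score_py_alt cols = scoreGet (bLoop cols 0) from rfl]
  exact main_inv cols 0 (by norm_num) (by norm_num)

lemma a_eq (cols : List String) : table_score_py cols = F 0 cols := by
  simp only [table_score_py, inter_nonempty]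
  simp only [F, show hb 0 1 = false from rfl, show hb 0 2 = false from rfl,
    show hb 0 4 = false from rfl, show hb 0 8 = false from rfl, show hb 0 16 = false from rfl,
    Bool.false_or, a0, a1, a2, a3, a4]
  split_ifs <;> omega

-- ===== VERDICT (by name: the statement is the Claim_ definition above) =====
theorem table_score_py_spec : Claim_equal_table_score_py := by
  intro cols _
  unfold Spec_table_score_py
  rw [a_eq, alt_eq]
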